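-- pv_equiv track=rewrite | github.com/N0tAR3aLLI0N/mytools | TH3CRYPT0LI0N.py | bacon_cipher_decrypt
-- ===== SOURCE A (Python) =====
-- def bacon_cipher_decrypt(text):
--     """Decrypt Bacon's Cipher."""
--     BACON_DICT = {
--         "aaaaa": "A", "aaaab": "B", "aaaba": "C", "aaabb": "D", "aabaa": "E",
--         "aabab": "F", "aabba": "G", "aabbb": "H", "abaaa": "I", "abaab": "J",
--         "ababa": "K", "ababb": "L", "abbaa": "M", "abbab": "N", "abbba": "O",
--         "abbbb": "P", "baaaa": "Q", "baaab": "R", "baaba": "S", "baabb": "T",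
--         "babaa": "U", "babab": "V", "babba": "W", "babbb": "X", "bbaaa": "Y",
--         "bbaab": "Z"
--     }
--     try:
--         return ''.join(BACON_DICT[char] for char in text.split())
--     except KeyError:
--         return "Error decoding Bacon's Cipher."
-- ===== SOURCE B (Python) =====
-- def bacon_cipher_decrypt(text):
--     """Decrypt Bacon's Cipher arithmetically: a/b digits as binary, no lookup table."""
--     out = []
--     for tok in text.split():
--         if len(tok) != 5 or any(c != 'a' and c != 'b' for c in tok):
--             return "Error decoding Bacon's Cipher."
--         v = 0
--         for c in tok:
--             v = v * 2 + (1 if c == 'b' else 0)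
--         if v >= 26:
--             return "Error decoding Bacon's Cipher."
--         out.append(chr(65 + v))
--     return ''.join(out)
-- ===== Notes on version B (the rewrite author's own statement) =====
-- stated objective: simpler
-- what changed: Replaces the 26-entry BACON_DICT lookup inside a try/except with a direct arithmetic decode: each whitespace token is checked to be five a/b characters, read as a binary number v (a=0, b=1), and emitted as chr(65+v) when v<26, with an explicit early return of the error string otherwise.
import Mathlib
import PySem

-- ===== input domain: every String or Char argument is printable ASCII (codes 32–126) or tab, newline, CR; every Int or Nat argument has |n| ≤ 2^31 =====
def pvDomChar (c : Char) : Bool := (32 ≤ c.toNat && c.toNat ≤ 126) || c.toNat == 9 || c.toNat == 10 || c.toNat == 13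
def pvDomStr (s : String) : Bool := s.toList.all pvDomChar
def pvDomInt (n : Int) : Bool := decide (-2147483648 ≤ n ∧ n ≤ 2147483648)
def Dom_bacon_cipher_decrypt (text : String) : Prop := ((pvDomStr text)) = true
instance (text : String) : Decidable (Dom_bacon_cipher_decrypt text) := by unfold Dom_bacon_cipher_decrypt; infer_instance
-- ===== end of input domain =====

-- B drops the 26-entry lookup table and decodes each 5-char a/b token arithmetically (a=0, b=1, binary,
-- chr(65+v) when v < 26), returning the same error string on any invalid token; objective: simpler.

-- ===== PORT A =====
def baconDict : PySem.Dict String String := PySem.Dict.ofList [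
  ("aaaaa", "A"), ("aaaab", "B"), ("aaaba", "C"), ("aaabb", "D"), ("aabaa", "E"),
  ("aabab", "F"), ("aabba", "G"), ("aabbb", "H"), ("abaaa", "I"), ("abaab", "J"),
  ("ababa", "K"), ("ababb", "L"), ("abbaa", "M"), ("abbab", "N"), ("abbba", "O"),
  ("abbbb", "P"), ("baaaa", "Q"), ("baaab", "R"), ("baaba", "S"), ("baabb", "T"),
  ("babaa", "U"), ("babab", "V"), ("babba", "W"), ("babbb", "X"), ("bbaaa", "Y"),
  ("bbaab", "Z")]

-- ''.join(BACON_DICT[char] for char in text.split()) inside try/except KeyError: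
-- a none from get? (= KeyError) aborts the join and yields the error string.
def bacon_cipher_decrypt (text : String) : String :=
  match (PySem.Str.split₀ text).mapM (fun tok => baconDict.get? tok) with
  | some parts => PySem.Str.join "" parts
  | none => "Error decoding Bacon's Cipher."

-- ===== PORT B =====
-- v = 0; for c in tok: v = v*2 + (1 if c == 'b' else 0)
def baconTokVal (cs : List Char) : Nat :=
  cs.foldl (fun v c => v * 2 + (if c = 'b' then 1 else 0)) 0

-- the for-loop over text.split() with early returns, accumulator out
def baconAltGo : List String → List Char → String
  | [], out => String.ofList out
  | tok :: rest, out =>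
    if tok.toList.length ≠ 5 ∨ ¬ (tok.toList.all (fun c => c = 'a' || c = 'b')) = true then
      "Error decoding Bacon's Cipher."
    else
      let v := baconTokVal tok.toList
      if 26 ≤ v then "Error decoding Bacon's Cipher."
      else baconAltGo rest (out ++ [Char.ofNat (65 + v)])

def bacon_cipher_decrypt_alt (text : String) : String :=
  baconAltGo (PySem.Str.split₀ text) []

-- ===== PRECONDITION & SPEC =====
def Spec_bacon_cipher_decrypt (text : String) (out : String) : Prop := out = bacon_cipher_decrypt_alt text
instance (text : String) (out : String) : Decidable (Spec_bacon_cipher_decrypt text out) := by unfold Spec_bacon_cipher_decrypt; infer_instance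

-- ===== CLAIM (what is proved, stated in full; the proofs are below) =====
def Claim_equal_bacon_cipher_decrypt : Prop := ∀ (text : String), Dom_bacon_cipher_decrypt text → Spec_bacon_cipher_decrypt text (bacon_cipher_decrypt text)

-- ===== LEMMAS AND PROOFS =====

-- a token is decodable iff it is five a/b chars with value < 26
def validTok (cs : List Char) : Bool :=
  cs.length == 5 && cs.all (fun c => c = 'a' || c = 'b') && decide (baconTokVal cs < 26)

-- proof-side per-token decoder
def decodeTok? (tok : String) : Option Char :=
  if validTok tok.toList then some (Char.ofNat (65 + baconTokVal tok.toList)) else none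

-- per-token characterisation of A's dict lookup
lemma get?_baconDict (s : String) :
    baconDict.get? s = (decodeTok? s).map (fun c => String.ofList [c]) := by
  unfold decodeTok?
  by_cases hv : validTok s.toList = true
  · rw [if_pos hv, Option.map_some]
    have hs : String.ofList s.toList = s := by simp
    unfold validTok at hv
    simp only [Bool.and_eq_true, beq_iff_eq, List.all_eq_true, decide_eq_true_eq] at hv
    obtain ⟨⟨hlen, hab⟩, hlt⟩ := hv
    match hcs : s.toList with
    | [c1, c2, c3, c4, c5] =>
      rw [hcs] at hs
      have h1 := hab c1 (by rw [hcs]; simp); have h2 := hab c2 (by rw [hcs]; simp)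
      have h3 := hab c3 (by rw [hcs]; simp); have h4 := hab c4 (by rw [hcs]; simp)
      have h5 := hab c5 (by rw [hcs]; simp)
      rw [hcs] at hlt
      simp only [decide_eq_true_eq, Bool.or_eq_true] at h1 h2 h3 h4 h5
      rcases h1 with rfl | rfl <;> rcases h2 with rfl | rfl <;>
        rcases h3 with rfl | rfl <;> rcases h4 with rfl | rfl <;> rcases h5 with rfl | rfl <;>
        first
          | (exact absurd hlt (by decide))
          | (rw [← hs]; decide)
    | [] => rw [hcs] at hlen; simp at hlen
    | [_] => rw [hcs] at hlen; simp at hlen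
    | [_, _] => rw [hcs] at hlen; simp at hlen
    | [_, _, _] => rw [hcs] at hlen; simp at hlen
    | [_, _, _, _] => rw [hcs] at hlen; simp at hlen
    | _ :: _ :: _ :: _ :: _ :: _ :: _ => rw [hcs] at hlen; simp at hlen
  · rw [if_neg hv, Option.map_none, PySem.Dict.get?_eq_none_iff_not_mem_keys]
    intro hmem
    have hk : baconDict.keys = ["aaaaa", "aaaab", "aaaba", "aaabb", "aabaa",
        "aabab", "aabba", "aabbb", "abaaa", "abaab", "ababa", "ababb", "abbaa",
        "abbab", "abbba", "abbbb", "baaaa", "baaab", "baaba", "baabb", "babaa",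
        "babab", "babba", "babbb", "bbaaa", "bbaab"] := by decide
    rw [hk] at hmem
    simp only [List.mem_cons, List.not_mem_nil, or_false] at hmem
    rcases hmem with rfl|rfl|rfl|rfl|rfl|rfl|rfl|rfl|rfl|rfl|rfl|rfl|rfl|rfl|rfl|rfl|rfl|rfl|rfl|rfl|rfl|rfl|rfl|rfl|rfl|rfl <;>
      exact hv (by decide)

-- A's mapM over the dict is the per-token decode followed by wrapping each char
lemma mapM_get?_eq (toks : List String) :
    toks.mapM (fun tok => baconDict.get? tok)
      = (toks.mapM decodeTok?).map (List.map (fun c => String.ofList [c])) := by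
  induction toks with
  | nil => rfl
  | cons tok rest ih =>
    rw [List.mapM_cons, List.mapM_cons, ih, get?_baconDict tok]
    cases decodeTok? tok <;> cases rest.mapM decodeTok? <;> rfl

-- B's loop against the per-token decode
lemma baconAltGo_eq (toks : List String) (acc : List Char) :
    baconAltGo toks acc =
      match toks.mapM decodeTok? with
      | some cs => String.ofList (acc ++ cs)
      | none => "Error decoding Bacon's Cipher." := by
  induction toks generalizing acc with
  | nil => simp [baconAltGo]
  | cons tok rest ih =>
    rw [List.mapM_cons]
    by_cases hv : validTok tok.toList = true
    · have hv' := hv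
      unfold validTok at hv'
      simp only [Bool.and_eq_true, beq_iff_eq, decide_eq_true_eq] at hv'
      have hgo : baconAltGo (tok :: rest) acc
          = baconAltGo rest (acc ++ [Char.ofNat (65 + baconTokVal tok.toList)]) := by
        simp [baconAltGo, hv'.1.1, hv'.1.2, Nat.not_le.mpr hv'.2]
      rw [hgo, ih]
      have hd : decodeTok? tok = some (Char.ofNat (65 + baconTokVal tok.toList)) := by
        unfold decodeTok?; rw [if_pos hv]
      rw [hd]
      cases hr : rest.mapM decodeTok? with
      | none => rfl
      | some cs => simp
    · have hgo : baconAltGo (tok :: rest) acc = "Error decoding Bacon's Cipher." := by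
        unfold baconAltGo
        by_cases hc : tok.toList.length ≠ 5 ∨ ¬ (tok.toList.all (fun c => c = 'a' || c = 'b')) = true
        · rw [if_pos hc]
        · rw [if_neg hc]
          push Not at hc
          have h26 : 26 ≤ baconTokVal tok.toList := by
            by_contra hlt
            refine hv ?_
            unfold validTok
            simp [hc.1, hc.2, Nat.lt_of_not_le hlt]
          simp [h26]
      have hd : decodeTok? tok = none := by unfold decodeTok?; rw [if_neg hv]
      rw [hgo, hd]
      rfl

-- joining the singleton wrappers gives back the char list
lemma join_singletons (cs : List Char) :
    PySem.Str.join "" (cs.map (fun c => String.ofList [c])) = String.ofList cs := by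
  apply String.toList_inj.mp
  simp only [PySem.Str.join, String.toList_ofList, List.map_map, Function.comp_def]
  exact PySem.Chars.join_nil_singletons cs

-- ===== VERDICT (by name: the statement is the Claim_ definition above) =====
theorem bacon_cipher_decrypt_spec : Claim_equal_bacon_cipher_decrypt := by
  intro text _
  unfold Spec_bacon_cipher_decrypt bacon_cipher_decrypt bacon_cipher_decrypt_alt
  rw [mapM_get?_eq, baconAltGo_eq]
  cases h : (PySem.Str.split₀ text).mapM decodeTok? with
  | none => rfl
  | some cs =>
    simp only [Option.map_some]
    rw [join_singletons]
    simp
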